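-- pv_equiv track=rewrite | github.com/woshiqingteng/embedded | code/acm/solution/simulation/print_li/print_li.py | print_li
-- ===== SOURCE A (Python) =====
-- def print_li(n):
--     template = [
--         "...........",  # 第0行
--         "..*******..",  # 第1行
--         "..*..*..*..",  # 第2行
--         "..*******..",  # 第3行
--         "..*..*..*..",  # 第4行
--         "..*******..",  # 第5行
--         ".....*.....",  # 第6行
--         "..*******..",  # 第7行
--         ".....*.....",  # 第8行
--         ".*********.",  # 第9行
--         "..........."   # 第10行
--     ]
--     result = []
--     for line in template:
--         expanded_line = "".join(char * n for char in line)
--         for _ in range(n):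
--             result.append(expanded_line)
--
--     return result
-- ===== SOURCE B (Python) =====
-- def print_li(n):
--     template = [
--         "...........",  # 第0行
--         "..*******..",  # 第1行
--         "..*..*..*..",  # 第2行
--         "..*******..",  # 第3行
--         "..*..*..*..",  # 第4行
--         "..*******..",  # 第5行
--         ".....*.....",  # 第6行
--         "..*******..",  # 第7行
--         ".....*.....",  # 第8行
--         ".*********.",  # 第9行
--         "..........."   # 第10行
--     ]
--
--     def rle(seq):
--         # run-length encode: [(item, count)] for maximal runs of equal items
--         runs = []
--         for x in seq:
--             if runs and runs[-1][0] == x: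
--                 runs[-1] = (x, runs[-1][1] + 1)
--             else:
--                 runs.append((x, 1))
--         return runs
--
--     # scale runs, not cells: each run of c equal chars becomes one run of c*n,
--     # each run of rcount equal rows becomes rcount*n copies of the scaled row
--     result = []
--     for row, rcount in rle(template):
--         line = "".join(ch * (c * n) for ch, c in rle(row))
--         result.extend([line] * (rcount * n))
--     return result
-- ===== Notes on version B (the rewrite author's own statement) =====
-- stated objective: alternative
-- what changed: B run-length encodes the template (rows and each row's characters) and scales the runs: each character run of length c becomes one run of c*n, each row run of length rcount becomes rcount*n copies of the scaled line, instead of A's per-character char*n expansion and n-fold appending.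
import Mathlib
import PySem

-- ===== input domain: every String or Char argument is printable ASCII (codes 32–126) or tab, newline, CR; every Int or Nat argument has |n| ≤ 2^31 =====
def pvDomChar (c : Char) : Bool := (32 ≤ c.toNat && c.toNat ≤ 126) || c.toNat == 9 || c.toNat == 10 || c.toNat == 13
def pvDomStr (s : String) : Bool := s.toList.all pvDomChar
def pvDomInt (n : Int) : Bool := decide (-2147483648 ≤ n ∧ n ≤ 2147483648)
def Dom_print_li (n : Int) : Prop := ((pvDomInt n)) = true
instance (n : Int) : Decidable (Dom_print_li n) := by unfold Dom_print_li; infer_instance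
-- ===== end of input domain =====

-- B run-length encodes the template (rows and characters) and scales the runs instead of
-- replicating cells; alternative decomposition, same output-bound cost.

-- ===== PORT A =====
def pvTemplate : List String :=
  [ "...........",
    "..*******..",
    "..*..*..*..",
    "..*******..",
    "..*..*..*..",
    "..*******..",
    ".....*.....",
    "..*******..",
    ".....*.....",
    ".*********.",
    "..........." ]

-- 'char * n' is List.replicate n.toNat (empty for n ≤ 0, as in Python); "".join over the chars is flatMap
def print_li (n : Int) : List String :=
  pvTemplate.foldl (fun result line =>
    let expanded : String := String.ofList (line.toList.flatMap (fun c => List.replicate n.toNat c))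
    (PySem.List.pyRange 0 n 1).foldl (fun r _ => r ++ [expanded]) result) []

-- ===== PORT B =====
-- Source B's rle: 'runs[-1] = (x, runs[-1][1] + 1)' mutates the last entry, ported as dropLast ++ [updated]
def pvRle {α : Type} [BEq α] (seq : List α) : List (α × Int) :=
  seq.foldl (fun runs x =>
    match runs.getLast? with
    | some (y, c) => if y == x then runs.dropLast ++ [(x, c + 1)] else runs ++ [(x, 1)]
    | none => [(x, 1)]) []

-- 'ch * (c * n)' is List.replicate (c*n).toNat; '[line] * (rcount*n)' likewise
def print_li_alt (n : Int) : List String :=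
  (pvRle pvTemplate).foldl (fun result rr =>
    let line : String :=
      String.ofList ((pvRle rr.1.toList).flatMap (fun cc => List.replicate (cc.2 * n).toNat cc.1))
    result ++ List.replicate (rr.2 * n).toNat line) []

-- ===== PRECONDITION & SPEC =====
def Spec_print_li (n : Int) (out : List String) : Prop := out = print_li_alt n
instance (n : Int) (out : List String) : Decidable (Spec_print_li n out) := by unfold Spec_print_li; infer_instance

-- ===== CLAIM (what is proved, stated in full; the proofs are below) =====
def Claim_equal_print_li : Prop := ∀ (n : Int), Dom_print_li n → Spec_print_li n (print_li n)

-- ===== LEMMAS AND PROOFS =====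

-- inner 'for _ in range(n): result.append(e)' appends n copies
lemma pv_foldl_app {α β : Type} (e : α) (xs : List β) :
    ∀ acc : List α, xs.foldl (fun r _ => r ++ [e]) acc = acc ++ List.replicate xs.length e := by
  induction xs with
  | nil => intro acc; simp
  | cons x xs ih =>
      intro acc
      rw [List.foldl_cons, ih]
      simp [List.replicate_succ]

-- expanding a character run of length c to c*n cells equals expanding each of its c cells to n:
-- one lemma per distinct template row (runs computed by rfl, run lengths split with omega)
lemma pv_rowA (n : Int) :
    (pvRle "...........".toList).flatMap (fun cc => List.replicate (cc.2 * n).toNat cc.1)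
      = "...........".toList.flatMap (fun c => List.replicate n.toNat c) := by
  rw [show pvRle "...........".toList = [('.', 11)] from rfl,
      show "...........".toList = ['.','.','.','.','.','.','.','.','.','.','.'] from rfl]
  simp only [List.flatMap_cons, List.flatMap_nil, List.append_nil]
  rw [show ((11 * n).toNat = n.toNat + n.toNat + n.toNat + n.toNat + n.toNat + n.toNat
      + n.toNat + n.toNat + n.toNat + n.toNat + n.toNat) from by omega]
  simp only [List.replicate_add, List.append_assoc]

lemma pv_rowB (n : Int) :
    (pvRle "..*******..".toList).flatMap (fun cc => List.replicate (cc.2 * n).toNat cc.1)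
      = "..*******..".toList.flatMap (fun c => List.replicate n.toNat c) := by
  rw [show pvRle "..*******..".toList = [('.', 2), ('*', 7), ('.', 2)] from rfl,
      show "..*******..".toList = ['.','.','*','*','*','*','*','*','*','.','.'] from rfl]
  simp only [List.flatMap_cons, List.flatMap_nil, List.append_nil]
  rw [show ((2 * n).toNat = n.toNat + n.toNat) from by omega,
      show ((7 * n).toNat = n.toNat + n.toNat + n.toNat + n.toNat + n.toNat + n.toNat + n.toNat)
        from by omega]
  simp only [List.replicate_add, List.append_assoc]

lemma pv_rowC (n : Int) :
    (pvRle "..*..*..*..".toList).flatMap (fun cc => List.replicate (cc.2 * n).toNat cc.1)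
      = "..*..*..*..".toList.flatMap (fun c => List.replicate n.toNat c) := by
  rw [show pvRle "..*..*..*..".toList
        = [('.', 2), ('*', 1), ('.', 2), ('*', 1), ('.', 2), ('*', 1), ('.', 2)] from rfl,
      show "..*..*..*..".toList = ['.','.','*','.','.','*','.','.','*','.','.'] from rfl]
  simp only [List.flatMap_cons, List.flatMap_nil, List.append_nil]
  rw [show ((2 * n).toNat = n.toNat + n.toNat) from by omega,
      show ((1 * n).toNat = n.toNat) from by omega]
  simp only [List.replicate_add, List.append_assoc]

lemma pv_rowD (n : Int) :
    (pvRle ".....*.....".toList).flatMap (fun cc => List.replicate (cc.2 * n).toNat cc.1)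
      = ".....*.....".toList.flatMap (fun c => List.replicate n.toNat c) := by
  rw [show pvRle ".....*.....".toList = [('.', 5), ('*', 1), ('.', 5)] from rfl,
      show ".....*.....".toList = ['.','.','.','.','.','*','.','.','.','.','.'] from rfl]
  simp only [List.flatMap_cons, List.flatMap_nil, List.append_nil]
  rw [show ((5 * n).toNat = n.toNat + n.toNat + n.toNat + n.toNat + n.toNat) from by omega,
      show ((1 * n).toNat = n.toNat) from by omega]
  simp only [List.replicate_add, List.append_assoc]

lemma pv_rowE (n : Int) :
    (pvRle ".*********.".toList).flatMap (fun cc => List.replicate (cc.2 * n).toNat cc.1)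
      = ".*********.".toList.flatMap (fun c => List.replicate n.toNat c) := by
  rw [show pvRle ".*********.".toList = [('.', 1), ('*', 9), ('.', 1)] from rfl,
      show ".*********.".toList = ['.','*','*','*','*','*','*','*','*','*','.'] from rfl]
  simp only [List.flatMap_cons, List.flatMap_nil, List.append_nil]
  rw [show ((1 * n).toNat = n.toNat) from by omega,
      show ((9 * n).toNat = n.toNat + n.toNat + n.toNat + n.toNat + n.toNat + n.toNat
        + n.toNat + n.toNat + n.toNat) from by omega]
  simp only [List.replicate_add, List.append_assoc]

-- ===== VERDICT (by name: the statement is the Claim_ definition above) =====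
theorem print_li_spec : Claim_equal_print_li := by
  intro n _
  unfold Spec_print_li
  -- A: each template row contributes n copies of its expanded line
  have hA : print_li n = pvTemplate.flatMap (fun line =>
      List.replicate n.toNat (String.ofList (line.toList.flatMap (fun c => List.replicate n.toNat c)))) := by
    simp only [print_li, pv_foldl_app, PySem.List.length_pyRange_one]
    simp [pvTemplate, List.flatMap_cons]
  -- B: the vertical rle of the template has all run lengths 1 (adjacent rows differ)
  have hRle : pvRle pvTemplate
      = [("...........", 1), ("..*******..", 1), ("..*..*..*..", 1), ("..*******..", 1),
         ("..*..*..*..", 1), ("..*******..", 1), (".....*.....", 1), ("..*******..", 1),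
         (".....*.....", 1), (".*********.", 1), ("...........", 1)] := by rfl
  rw [hA]
  unfold print_li_alt
  rw [hRle]
  simp only [List.foldl_cons, List.foldl_nil, List.nil_append, pvTemplate, List.flatMap_cons,
    List.flatMap_nil, List.append_nil, pv_rowA, pv_rowB, pv_rowC, pv_rowD, pv_rowE,
    show ∀ m : Int, (1 * m).toNat = m.toNat from fun m => by omega]
  simp [List.append_assoc]
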